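-- pv_equiv track=rewrite | github.com/HuynhTien23127494/Hashiwokakero | Source/Solver.py | generate_possible_edges
-- ===== SOURCE A (Python) =====
-- def generate_possible_edges(grid):
--     rows, cols = len(grid), len(grid[0])
--     islands = [(x, y, grid[x][y]) for x in range(rows) for y in range(cols) if grid[x][y] > 0]
--     edges = []
--
--     for i, (x1, y1, _) in enumerate(islands):
--         for j in range(i + 1, len(islands)):
--             x2, y2, _ = islands[j]
--             if x1 == x2 and all(grid[x1][k] == 0 for k in range(min(y1, y2) + 1, max(y1, y2))):
--                 edges.append(((x1, y1), (x2, y2)))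
--             elif y1 == y2 and all(grid[k][y1] == 0 for k in range(min(x1, x2) + 1, max(x1, x2))):
--                 edges.append(((x1, y1), (x2, y2)))
--     return edges
-- ===== SOURCE B (Python) =====
-- def generate_possible_edges(grid):
--     # For each island, scan once to the nearest nonzero cell to its right and
--     # below; if that cell is an island, it is the only connectable partner in
--     # that direction (single scans instead of all-pairs gap tests).
--     rows, cols = len(grid), len(grid[0])
--     edges = []
--     for x, y in [(x, y) for x in range(rows) for y in range(cols) if grid[x][y] > 0]:
--         row = grid[x]
--         for y2 in range(y + 1, cols):
--             if row[y2] != 0: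
--                 if row[y2] > 0:
--                     edges.append(((x, y), (x, y2)))
--                 break
--         for x2 in range(x + 1, rows):
--             if grid[x2][y] != 0:
--                 if grid[x2][y] > 0:
--                     edges.append(((x, y), (x2, y)))
--                 break
--     return edges
-- ===== Notes on version B (the rewrite author's own statement) =====
-- stated objective: alternative
-- what changed: Instead of testing every island pair with an O(L) gap scan, B scans from each island directly to the nearest nonzero cell to its right and below and emits only those two candidate edges, so the pairwise enumeration disappears.
import Mathlib
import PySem

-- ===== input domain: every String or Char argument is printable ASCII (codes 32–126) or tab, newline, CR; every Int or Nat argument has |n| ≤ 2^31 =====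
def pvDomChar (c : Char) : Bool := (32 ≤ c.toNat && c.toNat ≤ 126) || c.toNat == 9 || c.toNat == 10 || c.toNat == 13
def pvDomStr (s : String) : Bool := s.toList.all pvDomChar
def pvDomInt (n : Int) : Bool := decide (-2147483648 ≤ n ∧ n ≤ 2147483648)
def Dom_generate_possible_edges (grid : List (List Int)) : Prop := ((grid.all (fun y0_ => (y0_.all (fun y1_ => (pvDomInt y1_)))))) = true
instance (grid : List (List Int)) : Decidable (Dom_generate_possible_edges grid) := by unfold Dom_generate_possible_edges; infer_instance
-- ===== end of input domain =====

-- B replaces A's all-pairs island tests by a single scan from each island to the nearest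
-- nonzero cell to its right and below (objective: alternative algorithm, no pairwise pass).

-- ===== PORT A =====
def generate_possible_edges (grid : List (List Int)) : List ((Int × Int) × (Int × Int)) :=
  let rows : Int := grid.length
  let cols : Int := (PySem.List.pyGetD grid 0 []).length
  let islands : List (Int × Int × Int) :=
    (PySem.List.pyRange 0 rows 1).flatMap (fun x =>
      (PySem.List.pyRange 0 cols 1).filterMap (fun y =>
        if 0 < PySem.List.pyGetD (PySem.List.pyGetD grid x []) y 0 then
          some (x, y, PySem.List.pyGetD (PySem.List.pyGetD grid x []) y 0)
        else none))
  (PySem.List.enumerate islands 0).foldl (fun edges ip =>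
    (PySem.List.pyRange (ip.1 + 1) (islands.length : Int) 1).foldl (fun edges j =>
      let q := PySem.List.pyGetD islands j (0, 0, 0)
      if ip.2.1 = q.1 ∧ ((PySem.List.pyRange (min ip.2.2.1 q.2.1 + 1) (max ip.2.2.1 q.2.1) 1).all
            (fun k => PySem.List.pyGetD (PySem.List.pyGetD grid ip.2.1 []) k 0 == 0)) then
        edges ++ [((ip.2.1, ip.2.2.1), (q.1, q.2.1))]
      else if ip.2.2.1 = q.2.1 ∧ ((PySem.List.pyRange (min ip.2.1 q.1 + 1) (max ip.2.1 q.1) 1).all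
            (fun k => PySem.List.pyGetD (PySem.List.pyGetD grid k []) ip.2.2.1 0 == 0)) then
        edges ++ [((ip.2.1, ip.2.2.1), (q.1, q.2.1))]
      else edges) edges) []

-- ===== PORT B =====
def generate_possible_edges_alt (grid : List (List Int)) : List ((Int × Int) × (Int × Int)) :=
  let rows : Int := grid.length
  let cols : Int := (PySem.List.pyGetD grid 0 []).length
  ((PySem.List.pyRange 0 rows 1).flatMap (fun x =>
      (PySem.List.pyRange 0 cols 1).filterMap (fun y =>
        if 0 < PySem.List.pyGetD (PySem.List.pyGetD grid x []) y 0 then some (x, y) else none))).foldl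
    (fun edges xy =>
      let row := PySem.List.pyGetD grid xy.1 []
      let e1 : List ((Int × Int) × (Int × Int)) :=
        match (PySem.List.pyRange (xy.2 + 1) cols 1).find?
            (fun y2 => PySem.List.pyGetD row y2 0 != 0) with
        | some y2 => if 0 < PySem.List.pyGetD row y2 0 then [((xy.1, xy.2), (xy.1, y2))] else []
        | none => []
      let e2 : List ((Int × Int) × (Int × Int)) :=
        match (PySem.List.pyRange (xy.1 + 1) rows 1).find?
            (fun x2 => PySem.List.pyGetD (PySem.List.pyGetD grid x2 []) xy.2 0 != 0) with
        | some x2 => if 0 < PySem.List.pyGetD (PySem.List.pyGetD grid x2 []) xy.2 0 then [((xy.1, xy.2), (x2, xy.2))] else []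
        | none => []
      edges ++ e1 ++ e2) []

-- ===== PRECONDITION & SPEC =====
-- Python A raises IndexError on the empty grid (it reads grid[0]) and whenever some row is shorter than row 0;
-- Pre_ admits exactly the grids on which A returns (rows may be longer than row 0: extra cells are never read).
def Pre_generate_possible_edges (grid : List (List Int)) : Prop :=
  grid ≠ [] ∧ ∀ row ∈ grid, (grid.headD []).length ≤ row.length
instance (grid : List (List Int)) : Decidable (Pre_generate_possible_edges grid) := by
  unfold Pre_generate_possible_edges; infer_instance
def pvWitness_generate_possible_edges : List (List Int) := [[1, 0, 2], [0, 0, 0], [3, 0, 4]]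

def Spec_generate_possible_edges (grid : List (List Int)) (out : List ((Int × Int) × (Int × Int))) : Prop := out = generate_possible_edges_alt grid
instance (grid : List (List Int)) (out : List ((Int × Int) × (Int × Int))) : Decidable (Spec_generate_possible_edges grid out) := by unfold Spec_generate_possible_edges; infer_instance

-- ===== CLAIM (what is proved, stated in full; the proofs are below) =====
def Claim_equal_generate_possible_edges : Prop := ∀ (grid : List (List Int)), Dom_generate_possible_edges grid → Pre_generate_possible_edges grid → Spec_generate_possible_edges grid (generate_possible_edges grid)

-- ===== LEMMAS AND PROOFS =====

/-- Cell value at (x, y), 0 outside the grid. -/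
def pvG (grid : List (List Int)) (x y : Nat) : Int := (grid.getD x []).getD y 0

/-- Row-major list of island coordinates. -/
def pvIsl (g : Nat → Nat → Int) (R C : Nat) : List (Nat × Nat) :=
  (List.range R).flatMap fun x =>
    (List.range C).filterMap fun y => if 0 < g x y then some (x, y) else none

/-- Strict row-major (lexicographic) order on coordinates. -/
def pvLex (p q : Nat × Nat) : Prop := p.1 < q.1 ∨ (p.1 = q.1 ∧ p.2 < q.2)

/-- A's same-row connectability test, in terms of cell values. -/
abbrev pvRowC (g : Nat → Nat → Int) (p q : Nat × Nat) : Prop :=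
  p.1 = q.1 ∧ ∀ j < max p.2 q.2, min p.2 q.2 + 1 ≤ j → g p.1 j = 0

/-- A's same-column connectability test. -/
abbrev pvColC (g : Nat → Nat → Int) (p q : Nat × Nat) : Prop :=
  p.2 = q.2 ∧ ∀ j < max p.1 q.1, min p.1 q.1 + 1 ≤ j → g j p.2 = 0

abbrev pvConn (g : Nat → Nat → Int) (p q : Nat × Nat) : Prop := pvRowC g p q ∨ pvColC g p q

def pvEdge (p q : Nat × Nat) : (Int × Int) × (Int × Int) :=
  (((p.1 : Int), (p.2 : Int)), ((q.1 : Int), (q.2 : Int)))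

/-- A's pair loop, as recursion on suffixes of the island list. -/
def pvPairsA (g : Nat → Nat → Int) : List (Nat × Nat) → List ((Int × Int) × (Int × Int))
  | [] => []
  | p :: rest =>
      (rest.filter (fun q => decide (pvConn g p q))).map (pvEdge p) ++ pvPairsA g rest

/-- B's rightward scan: first nonzero cell strictly right of p in its row. -/
def pvRight (g : Nat → Nat → Int) (C : Nat) (p : Nat × Nat) : Option Nat :=
  (List.range' (p.2 + 1) (C - (p.2 + 1))).find? (fun j => g p.1 j != 0)

/-- B's downward scan: first nonzero cell strictly below p in its column. -/
def pvDown (g : Nat → Nat → Int) (R : Nat) (p : Nat × Nat) : Option Nat :=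
  (List.range' (p.1 + 1) (R - (p.1 + 1))).find? (fun i => g i p.2 != 0)

/-- B's per-island emission. -/
def pvEmitB (g : Nat → Nat → Int) (R C : Nat) (p : Nat × Nat) :
    List ((Int × Int) × (Int × Int)) :=
  (match pvRight g C p with
    | some j => if 0 < g p.1 j then [pvEdge p (p.1, j)] else []
    | none => []) ++
  (match pvDown g R p with
    | some i => if 0 < g i p.2 then [pvEdge p (i, p.2)] else []
    | none => [])

lemma pv_mem_isl {g : Nat → Nat → Int} {R C : Nat} {q : Nat × Nat} :
    q ∈ pvIsl g R C ↔ q.1 < R ∧ q.2 < C ∧ 0 < g q.1 q.2 := by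
  obtain ⟨a, b⟩ := q
  simp only [pvIsl, List.mem_flatMap, List.mem_filterMap, List.mem_range]
  constructor
  · rintro ⟨x, hx, y, hy, h⟩
    split at h
    · cases h; exact ⟨hx, hy, by assumption⟩
    · cases h
  · rintro ⟨h1, h2, h3⟩
    exact ⟨a, h1, b, h2, by simp [h3]⟩

lemma pv_filterMap_if {α β : Type} (l : List α) (c : α → Prop) [DecidablePred c] (f : α → β) :
    l.filterMap (fun a => if c a then some (f a) else none)
      = (l.filter (fun a => decide (c a))).map f := by
  induction l with
  | nil => rfl
  | cons a t ih => by_cases h : c a <;> simp [h, ih]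

lemma pv_pairwise_isl (g : Nat → Nat → Int) (R C : Nat) :
    (pvIsl g R C).Pairwise pvLex := by
  induction R with
  | zero => simp [pvIsl]
  | succ R ih =>
    unfold pvIsl at *
    rw [List.range_succ, List.flatMap_append]
    rw [List.pairwise_append]
    refine ⟨ih, ?_, ?_⟩
    · simp only [List.flatMap_cons, List.flatMap_nil, List.append_nil]
      rw [pv_filterMap_if]
      apply List.Pairwise.map
      · intro a b h
        exact h
      · exact ((List.pairwise_lt_range).filter _).imp (fun h => Or.inr ⟨rfl, h⟩)
    · intro a ha b hb
      have ha' : a.1 < R := (pv_mem_isl.mp ha).1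
      have hb' : b.1 = R := by
        simp only [List.flatMap_cons, List.flatMap_nil, List.append_nil, List.mem_filterMap,
          List.mem_range] at hb
        obtain ⟨y, _, h⟩ := hb
        split at h
        · cases h; rfl
        · cases h
      exact Or.inl (by omega)

lemma pv_find_range'_eq_some {s n m : Nat} {p : Nat → Bool} :
    (List.range' s n).find? p = some m
      ↔ s ≤ m ∧ m < s + n ∧ p m = true ∧ ∀ k, s ≤ k → k < m → ¬ p k = true := by
  induction n generalizing s with
  | zero => simp; omega
  | succ n ih =>
    rw [List.range'_succ, List.find?_cons]
    by_cases hs : p s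
    · simp only [hs, Option.some_inj]
      constructor
      · rintro rfl; exact ⟨le_refl _, by omega, hs, fun k h1 h2 => by omega⟩
      · rintro ⟨h1, _, _, h4⟩
        rcases Nat.lt_or_ge s m with h | h
        · exact absurd hs (h4 s (le_refl _) h)
        · omega
    · simp only [hs, ih]
      constructor
      · rintro ⟨h1, h2, h3, h4⟩
        refine ⟨by omega, by omega, h3, fun k hk1 hk2 => ?_⟩
        rcases Nat.eq_or_lt_of_le hk1 with rfl | h
        · simpa using hs
        · exact h4 k h hk2
      · rintro ⟨h1, h2, h3, h4⟩
        have : s ≠ m := by rintro rfl; simp [h3] at hs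
        exact ⟨by omega, by omega, h3, fun k hk1 hk2 => h4 k (by omega) hk2⟩

lemma pv_lex_asymm {p q : Nat × Nat} (h1 : pvLex p q) (h2 : pvLex q p) : False := by
  unfold pvLex at *; omega

lemma pv_pairwise_nodup {l : List (Nat × Nat)} (h : l.Pairwise pvLex) : l.Nodup :=
  h.imp (fun {p q} h => by rintro rfl; exact pv_lex_asymm h h)

lemma pv_conn_char {g : Nat → Nat → Int} {R C : Nat} {p q : Nat × Nat}
    (hp1 : p.1 < R) (hp2 : p.2 < C)
    (hq1 : q.1 < R) (hq2 : q.2 < C) (hq3 : 0 < g q.1 q.2) (hlex : pvLex p q) :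
    pvConn g p q ↔ (q.1 = p.1 ∧ pvRight g C p = some q.2) ∨ (q.2 = p.2 ∧ pvDown g R p = some q.1) := by
  unfold pvConn pvRowC pvColC
  constructor
  · rintro (⟨h1, h2⟩ | ⟨h1, h2⟩)
    · have hy : p.2 < q.2 := by rcases hlex with h | ⟨_, h⟩ <;> omega
      have hmin : min p.2 q.2 = p.2 := by omega
      have hmax : max p.2 q.2 = q.2 := by omega
      refine Or.inl ⟨h1.symm, ?_⟩
      rw [pvRight, pv_find_range'_eq_some]
      refine ⟨by omega, by omega, ?_, ?_⟩
      · simp only [bne_iff_ne, ne_eq]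
        rw [h1]; omega
      · intro k hk1 hk2
        simp only [bne_iff_ne, ne_eq, not_not]
        exact h2 k (by omega) (by omega)
    · have hx : p.1 < q.1 := by rcases hlex with h | ⟨_, h⟩ <;> omega
      have hmin : min p.1 q.1 = p.1 := by omega
      have hmax : max p.1 q.1 = q.1 := by omega
      refine Or.inr ⟨h1.symm, ?_⟩
      rw [pvDown, pv_find_range'_eq_some]
      refine ⟨by omega, by omega, ?_, ?_⟩
      · simp only [bne_iff_ne, ne_eq]
        rw [h1]; omega
      · intro k hk1 hk2
        simp only [bne_iff_ne, ne_eq, not_not]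
        exact h2 k (by omega) (by omega)
  · rintro (⟨h1, h2⟩ | ⟨h1, h2⟩)
    · rw [pvRight, pv_find_range'_eq_some] at h2
      obtain ⟨hb1, hb2, _, hb4⟩ := h2
      refine Or.inl ⟨h1.symm, ?_⟩
      intro j hj1 hj2
      have := hb4 j (by omega) (by omega)
      simp only [bne_iff_ne, ne_eq, not_not] at this
      exact this
    · rw [pvDown, pv_find_range'_eq_some] at h2
      obtain ⟨hb1, hb2, _, hb4⟩ := h2
      refine Or.inr ⟨h1.symm, ?_⟩
      intro j hj1 hj2
      have := hb4 j (by omega) (by omega)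
      simp only [bne_iff_ne, ne_eq, not_not] at this
      exact this

lemma pv_mem_matchR {g : Nat → Nat → Int} {C : Nat} {p q : Nat × Nat} :
    q ∈ (match pvRight g C p with
          | some j => if 0 < g p.1 j then [(p.1, j)] else []
          | none => ([] : List (Nat × Nat)))
      ↔ q.1 = p.1 ∧ pvRight g C p = some q.2 ∧ 0 < g p.1 q.2 := by
  obtain ⟨a, b⟩ := q
  rcases hR : pvRight g C p with _ | j
  · simp
  · show (a, b) ∈ (if 0 < g p.1 j then [(p.1, j)] else [])
        ↔ a = p.1 ∧ some j = some b ∧ 0 < g p.1 b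
    split_ifs with hg
    · simp only [List.mem_singleton, Prod.mk.injEq, Option.some.injEq]
      constructor
      · rintro ⟨rfl, rfl⟩; exact ⟨rfl, rfl, hg⟩
      · rintro ⟨rfl, rfl, _⟩; exact ⟨rfl, rfl⟩
    · constructor
      · intro hmem; cases hmem
      · rintro ⟨rfl, hjb, hgb⟩
        obtain rfl := Option.some.inj hjb
        exact absurd hgb hg

lemma pv_mem_matchD {g : Nat → Nat → Int} {R : Nat} {p q : Nat × Nat} :
    q ∈ (match pvDown g R p with
          | some i => if 0 < g i p.2 then [(i, p.2)] else []
          | none => ([] : List (Nat × Nat)))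
      ↔ q.2 = p.2 ∧ pvDown g R p = some q.1 ∧ 0 < g q.1 p.2 := by
  obtain ⟨a, b⟩ := q
  rcases hR : pvDown g R p with _ | i
  · simp
  · show (a, b) ∈ (if 0 < g i p.2 then [(i, p.2)] else [])
        ↔ b = p.2 ∧ some i = some a ∧ 0 < g a p.2
    split_ifs with hg
    · simp only [List.mem_singleton, Prod.mk.injEq, Option.some.injEq]
      constructor
      · rintro ⟨rfl, rfl⟩; exact ⟨rfl, rfl, hg⟩
      · rintro ⟨rfl, rfl, _⟩; exact ⟨rfl, rfl⟩
    · constructor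
      · intro hmem; cases hmem
      · rintro ⟨rfl, hia, hgb⟩
        obtain rfl := Option.some.inj hia
        exact absurd hgb hg

lemma pv_in_rest {g : Nat → Nat → Int} {R C : Nat} {pre rest : List (Nat × Nat)}
    {p q : Nat × Nat} (h : pvIsl g R C = pre ++ p :: rest)
    (hq : q ∈ pvIsl g R C) (hlex : pvLex p q) : q ∈ rest := by
  rw [h] at hq
  rcases List.mem_append.mp hq with h1 | h1
  · have hpw := pv_pairwise_isl g R C
    rw [h, List.pairwise_append] at hpw
    exact absurd (hpw.2.2 q h1 p (List.mem_cons_self)) (fun h' => pv_lex_asymm hlex h')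
  · rcases List.mem_cons.mp h1 with rfl | h2
    · exact absurd hlex (fun h' => pv_lex_asymm h' h')
    · exact h2

lemma pv_head {g : Nat → Nat → Int} {R C : Nat} {pre rest : List (Nat × Nat)} {p : Nat × Nat}
    (h : pvIsl g R C = pre ++ p :: rest) :
    rest.filter (fun q => decide (pvConn g p q))
      = (match pvRight g C p with
          | some j => if 0 < g p.1 j then [(p.1, j)] else []
          | none => [])
        ++ (match pvDown g R p with
          | some i => if 0 < g i p.2 then [(i, p.2)] else []
          | none => []) := by
  have hp : p ∈ pvIsl g R C := by rw [h]; exact List.mem_append.mpr (Or.inr List.mem_cons_self)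
  obtain ⟨hp1, hp2, hp3⟩ := pv_mem_isl.mp hp
  have hpw := pv_pairwise_isl g R C
  rw [h, List.pairwise_append] at hpw
  have hcons := hpw.2.1
  have hpR : ∀ q ∈ rest, pvLex p q := (List.pairwise_cons.mp hcons).1
  have hrestpw : rest.Pairwise pvLex := (List.pairwise_cons.mp hcons).2
  -- bounds of the scan hits
  have hRj : ∀ j, pvRight g C p = some j → p.2 < j ∧ j < C := by
    intro j hj
    rw [pvRight, pv_find_range'_eq_some] at hj
    omega
  have hDi : ∀ i, pvDown g R p = some i → p.1 < i ∧ i < R := by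
    intro i hi
    rw [pvDown, pv_find_range'_eq_some] at hi
    omega
  -- the RHS is sorted
  have hSpw : (((match pvRight g C p with
          | some j => if 0 < g p.1 j then [(p.1, j)] else []
          | none => [])
        ++ (match pvDown g R p with
          | some i => if 0 < g i p.2 then [(i, p.2)] else []
          | none => [])) : List (Nat × Nat)).Pairwise pvLex := by
    rw [List.pairwise_append]
    refine ⟨?_, ?_, ?_⟩
    · rcases pvRight g C p with _ | j
      · exact List.Pairwise.nil
      · show ((if 0 < g p.1 j then [(p.1, j)] else []) : List (Nat × Nat)).Pairwise pvLex
        split_ifs <;> simp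
    · rcases pvDown g R p with _ | i
      · exact List.Pairwise.nil
      · show ((if 0 < g i p.2 then [(i, p.2)] else []) : List (Nat × Nat)).Pairwise pvLex
        split_ifs <;> simp
    · intro a ha b hb
      obtain ⟨ha1, ha2, _⟩ := pv_mem_matchR.mp ha
      obtain ⟨hb1, hb2, _⟩ := pv_mem_matchD.mp hb
      have := hDi b.1 hb2
      exact Or.inl (by omega)
  -- both sides sorted & same members ⇒ equal
  apply List.Perm.eq_of_pairwise
    (fun a b _ _ h1 h2 => by cases pv_lex_asymm h1 h2)
    (hrestpw.filter _) hSpw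
  apply (List.perm_ext_iff_of_nodup
    ((pv_pairwise_nodup hrestpw).filter _) (pv_pairwise_nodup hSpw)).mpr
  intro q
  rw [List.mem_filter, decide_eq_true_iff, List.mem_append, pv_mem_matchR, pv_mem_matchD]
  constructor
  · rintro ⟨hmem, hconn⟩
    have hq : q ∈ pvIsl g R C := by
      rw [h]; exact List.mem_append.mpr (Or.inr (List.mem_cons.mpr (Or.inr hmem)))
    obtain ⟨hq1, hq2, hq3⟩ := pv_mem_isl.mp hq
    rcases (pv_conn_char hp1 hp2 hq1 hq2 hq3 (hpR q hmem)).mp hconn with ⟨h1, h2⟩ | ⟨h1, h2⟩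
    · exact Or.inl ⟨h1, h2, by rw [← h1]; exact hq3⟩
    · exact Or.inr ⟨h1, h2, by rw [← h1]; exact hq3⟩
  · intro hS
    have hq : q.1 < R ∧ q.2 < C ∧ 0 < g q.1 q.2 := by
      rcases hS with ⟨h1, h2, h3⟩ | ⟨h1, h2, h3⟩
      · have := hRj q.2 h2
        exact ⟨by omega, by omega, by rw [h1]; exact h3⟩
      · have := hDi q.1 h2
        exact ⟨by omega, by omega, by rw [← h1] at h3; exact h3⟩
    have hlex : pvLex p q := by
      rcases hS with ⟨h1, h2, _⟩ | ⟨h1, h2, _⟩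
      · have := hRj q.2 h2
        exact Or.inr ⟨h1.symm, by omega⟩
      · have := hDi q.1 h2
        exact Or.inl (by omega)
    have hmem : q ∈ rest := pv_in_rest h (pv_mem_isl.mpr hq) hlex
    refine ⟨hmem, (pv_conn_char hp1 hp2 hq.1 hq.2.1 hq.2.2 hlex).mpr ?_⟩
    rcases hS with ⟨h1, h2, _⟩ | ⟨h1, h2, _⟩
    · exact Or.inl ⟨h1, h2⟩
    · exact Or.inr ⟨h1, h2⟩

lemma pv_core_aux (g : Nat → Nat → Int) (R C : Nat) :
    ∀ (l pre : List (Nat × Nat)), pvIsl g R C = pre ++ l →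
      pvPairsA g l = l.flatMap (pvEmitB g R C) := by
  intro l
  induction l with
  | nil => intro pre h; rfl
  | cons p rest ih =>
    intro pre h
    have h' : pvIsl g R C = (pre ++ [p]) ++ rest := by rw [h]; simp
    rw [pvPairsA, List.flatMap_cons, ih (pre ++ [p]) h', pv_head h]
    congr 1
    unfold pvEmitB
    rcases pvRight g C p with _ | j <;> rcases pvDown g R p with _ | i <;>
      simp only [List.map_append, List.map_nil] <;>
      split_ifs <;> simp

lemma pv_core' (g : Nat → Nat → Int) (R C : Nat) :
    pvPairsA g (pvIsl g R C) = (pvIsl g R C).flatMap (pvEmitB g R C) :=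
  pv_core_aux g R C (pvIsl g R C) [] (by simp)

lemma pv_pyRange_natCast (a b : Nat) :
    PySem.List.pyRange a b 1 = (List.range' a (b - a)).map (fun k : Nat => (k : Int)) := by
  rw [PySem.List.pyRange_one, List.range'_eq_map_range, List.map_map]
  have h : ((b : Int) - a).toNat = b - a := by omega
  rw [h]
  apply List.map_congr_left
  intro k _
  simp

lemma pv_find_right (grid : List (List Int)) (x y C : Nat) :
    (PySem.List.pyRange ((y : Int) + 1) (C : Int) 1).find?
        (fun y2 => PySem.List.pyGetD (grid.getD x []) y2 0 != 0)
      = Option.map (fun j : Nat => (j : Int)) (pvRight (pvG grid) C (x, y)) := by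
  have h1 : ((y : Int) + 1) = ((y + 1 : Nat) : Int) := by push_cast; ring
  rw [h1, pv_pyRange_natCast, List.find?_map, pvRight]
  apply congrArg
  simp only [Function.comp_def, PySem.List.pyGetD_natCast]
  rfl

lemma pv_find_down (grid : List (List Int)) (x y R : Nat) :
    (PySem.List.pyRange ((x : Int) + 1) (R : Int) 1).find?
        (fun x2 => (PySem.List.pyGetD grid x2 []).getD y 0 != 0)
      = Option.map (fun i : Nat => (i : Int)) (pvDown (pvG grid) R (x, y)) := by
  have h1 : ((x : Int) + 1) = ((x + 1 : Nat) : Int) := by push_cast; ring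
  rw [h1, pv_pyRange_natCast, List.find?_map, pvDown]
  apply congrArg
  simp only [Function.comp_def, PySem.List.pyGetD_natCast]
  rfl

lemma pv_islandsB (grid : List (List Int)) :
    ((PySem.List.pyRange 0 (grid.length : Int) 1).flatMap (fun x =>
      (PySem.List.pyRange 0 ((PySem.List.pyGetD grid 0 []).length : Int) 1).filterMap (fun y =>
        if 0 < PySem.List.pyGetD (PySem.List.pyGetD grid x []) y 0 then some (x, y) else none)))
      = (pvIsl (pvG grid) grid.length (grid.getD 0 []).length).map
          (fun p => ((p.1 : Int), (p.2 : Int))) := by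
  rw [PySem.List.pyGetD_zero]
  simp only [PySem.List.pyRange_zero_natCast]
  rw [List.flatMap_map, pvIsl, List.map_flatMap]
  apply List.flatMap_congr
  intro x _
  rw [List.filterMap_map, List.map_filterMap]
  apply List.filterMap_congr
  intro y _
  simp only [Function.comp_def, PySem.List.pyGetD_natCast]
  by_cases h : 0 < pvG grid x y
  · rw [if_pos h, if_pos (show 0 < (grid.getD x []).getD y 0 from h)]
    rfl
  · rw [if_neg h, if_neg (show ¬ 0 < (grid.getD x []).getD y 0 from h)]
    rfl

lemma pv_bridgeB' (grid : List (List Int)) :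
    generate_possible_edges_alt grid
      = (pvIsl (pvG grid) grid.length (grid.getD 0 []).length).flatMap
          (pvEmitB (pvG grid) grid.length (grid.getD 0 []).length) := by
  simp only [generate_possible_edges_alt]
  rw [pv_islandsB, List.foldl_map]
  conv_rhs => rw [← List.nil_append ((pvIsl (pvG grid) grid.length (grid.getD 0 []).length).flatMap _)]
  rw [← PySem.List.foldl_append_eq_flatMap]
  apply PySem.List.foldl_congr_mem
  intro E p _
  obtain ⟨a, b⟩ := p
  simp only [PySem.List.pyGetD_natCast, PySem.List.pyGetD_zero]
  rw [pv_find_right, pv_find_down, pvEmitB]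
  rcases hR : pvRight (pvG grid) (grid.getD 0 []).length (a, b) with _ | j <;>
    rcases hD : pvDown (pvG grid) grid.length (a, b) with _ | i <;>
    simp [pvEdge, pvG, PySem.List.pyGetD_natCast, List.append_assoc]

def pvTr (grid : List (List Int)) (p : Nat × Nat) : Int × Int × Int :=
  ((p.1 : Int), (p.2 : Int), pvG grid p.1 p.2)

lemma pv_enumerate_map {α β : Type} (f : α → β) (l : List α) (s : Int) :
    PySem.List.enumerate (l.map f) s = (PySem.List.enumerate l s).map (fun ip => (ip.1, f ip.2)) := by
  induction l generalizing s with
  | nil => simp [PySem.List.enumerate_nil]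
  | cons a t ih => simp [PySem.List.enumerate_cons, ih]

lemma pv_islandsA (grid : List (List Int)) :
    ((PySem.List.pyRange 0 (grid.length : Int) 1).flatMap (fun x =>
      (PySem.List.pyRange 0 ((PySem.List.pyGetD grid 0 []).length : Int) 1).filterMap (fun y =>
        if 0 < PySem.List.pyGetD (PySem.List.pyGetD grid x []) y 0 then
          some (x, y, PySem.List.pyGetD (PySem.List.pyGetD grid x []) y 0)
        else none)))
      = (pvIsl (pvG grid) grid.length (grid.getD 0 []).length).map (pvTr grid) := by
  rw [PySem.List.pyGetD_zero]
  simp only [PySem.List.pyRange_zero_natCast]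
  rw [List.flatMap_map, pvIsl, List.map_flatMap]
  apply List.flatMap_congr
  intro x _
  rw [List.filterMap_map, List.map_filterMap]
  apply List.filterMap_congr
  intro y _
  simp only [Function.comp_def, PySem.List.pyGetD_natCast]
  by_cases h : 0 < pvG grid x y
  · rw [if_pos h, if_pos (show 0 < (grid.getD x []).getD y 0 from h)]
    rfl
  · rw [if_neg h, if_neg (show ¬ 0 < (grid.getD x []).getD y 0 from h)]
    rfl

lemma pv_rowInt_iff (grid : List (List Int)) (p q : Nat × Nat) :
    ((p.1 : Int) = (q.1 : Int) ∧
      ((PySem.List.pyRange (min (p.2 : Int) (q.2 : Int) + 1) (max (p.2 : Int) (q.2 : Int)) 1).all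
        (fun k => PySem.List.pyGetD (PySem.List.pyGetD grid (p.1 : Int) []) k 0 == 0)) = true)
      ↔ pvRowC (pvG grid) p q := by
  have h1 : min (p.2 : Int) (q.2 : Int) + 1 = ((min p.2 q.2 + 1 : Nat) : Int) := by push_cast; omega
  have h2 : max (p.2 : Int) (q.2 : Int) = ((max p.2 q.2 : Nat) : Int) := by push_cast; omega
  rw [h1, h2, pv_pyRange_natCast, List.all_map, pvRowC]
  simp only [Function.comp_def, PySem.List.pyGetD_natCast, List.all_eq_true, List.mem_range'_1,
    beq_iff_eq, Nat.cast_inj, and_imp]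
  constructor
  · rintro ⟨hx, hall⟩
    exact ⟨hx, fun j hj1 hj2 => hall j hj2 (by omega)⟩
  · rintro ⟨hx, hall⟩
    exact ⟨hx, fun j hj1 hj2 => hall j (by omega) (by omega)⟩

lemma pv_colInt_iff (grid : List (List Int)) (p q : Nat × Nat) :
    ((p.2 : Int) = (q.2 : Int) ∧
      ((PySem.List.pyRange (min (p.1 : Int) (q.1 : Int) + 1) (max (p.1 : Int) (q.1 : Int)) 1).all
        (fun k => PySem.List.pyGetD (PySem.List.pyGetD grid k []) (p.2 : Int) 0 == 0)) = true)
      ↔ pvColC (pvG grid) p q := by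
  have h1 : min (p.1 : Int) (q.1 : Int) + 1 = ((min p.1 q.1 + 1 : Nat) : Int) := by push_cast; omega
  have h2 : max (p.1 : Int) (q.1 : Int) = ((max p.1 q.1 : Nat) : Int) := by push_cast; omega
  rw [h1, h2, pv_pyRange_natCast, List.all_map, pvColC]
  simp only [Function.comp_def, PySem.List.pyGetD_natCast, List.all_eq_true, List.mem_range'_1,
    beq_iff_eq, Nat.cast_inj, and_imp]
  constructor
  · rintro ⟨hx, hall⟩
    exact ⟨hx, fun j hj1 hj2 => hall j hj2 (by omega)⟩
  · rintro ⟨hx, hall⟩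
    exact ⟨hx, fun j hj1 hj2 => hall j (by omega) (by omega)⟩

lemma pv_innerA0 (grid : List (List Int)) (p q : Nat × Nat)
    (E : List ((Int × Int) × (Int × Int))) :
    (if (p.1 : Int) = (q.1 : Int) ∧
        ((PySem.List.pyRange (min (p.2 : Int) (q.2 : Int) + 1) (max (p.2 : Int) (q.2 : Int)) 1).all
          (fun k => PySem.List.pyGetD (PySem.List.pyGetD grid (p.1 : Int) []) k 0 == 0)) = true then
      E ++ [(((p.1 : Int), (p.2 : Int)), ((q.1 : Int), (q.2 : Int)))]
    else if (p.2 : Int) = (q.2 : Int) ∧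
        ((PySem.List.pyRange (min (p.1 : Int) (q.1 : Int) + 1) (max (p.1 : Int) (q.1 : Int)) 1).all
          (fun k => PySem.List.pyGetD (PySem.List.pyGetD grid k []) (p.2 : Int) 0 == 0)) = true then
      E ++ [(((p.1 : Int), (p.2 : Int)), ((q.1 : Int), (q.2 : Int)))]
    else E)
      = if pvConn (pvG grid) p q then E ++ [pvEdge p q] else E := by
  unfold pvConn
  split_ifs with h1 h2 h3 h4 h5
  · rfl
  · exact absurd (Or.inl ((pv_rowInt_iff grid p q).mp h1)) h2
  · rfl
  · exact absurd (Or.inr ((pv_colInt_iff grid p q).mp h3)) h4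
  · rcases h5 with h | h
    · exact absurd ((pv_rowInt_iff grid p q).mpr h) h1
    · exact absurd ((pv_colInt_iff grid p q).mpr h) h3
  · rfl

lemma pv_innerA (grid : List (List Int)) (p q : Nat × Nat)
    (E : List ((Int × Int) × (Int × Int))) :
    (if (p.1 : Int) = (pvTr grid q).1 ∧
        ((PySem.List.pyRange (min (p.2 : Int) (pvTr grid q).2.1 + 1) (max (p.2 : Int) (pvTr grid q).2.1) 1).all
          (fun k => PySem.List.pyGetD (PySem.List.pyGetD grid (p.1 : Int) []) k 0 == 0)) = true then
      E ++ [(((p.1 : Int), (p.2 : Int)), ((pvTr grid q).1, (pvTr grid q).2.1))]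
    else if (p.2 : Int) = (pvTr grid q).2.1 ∧
        ((PySem.List.pyRange (min (p.1 : Int) (pvTr grid q).1 + 1) (max (p.1 : Int) (pvTr grid q).1) 1).all
          (fun k => PySem.List.pyGetD (PySem.List.pyGetD grid k []) (p.2 : Int) 0 == 0)) = true then
      E ++ [(((p.1 : Int), (p.2 : Int)), ((pvTr grid q).1, (pvTr grid q).2.1))]
    else E)
      = if pvConn (pvG grid) p q then E ++ [pvEdge p q] else E := by
  have := pv_innerA0 grid p q E
  simpa only [pvTr] using this

lemma pv_innerLoop (grid : List (List Int)) (p : Nat × Nat) (s : Nat)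
    (pre rest : List (Nat × Nat))
    (h : pvIsl (pvG grid) grid.length (grid.getD 0 []).length = pre ++ p :: rest)
    (hs : pre.length = s) (E : List ((Int × Int) × (Int × Int))) :
    (PySem.List.pyRange ((s : Int) + 1)
        ((((pvIsl (pvG grid) grid.length (grid.getD 0 []).length).map (pvTr grid)).length : Nat) : Int) 1).foldl
      (fun E j =>
        if ((p.1 : Nat) : Int) = (PySem.List.pyGetD ((pvIsl (pvG grid) grid.length (grid.getD 0 []).length).map (pvTr grid)) j (0, 0, 0)).1 ∧
            ((PySem.List.pyRange (min ((p.2 : Nat) : Int) (PySem.List.pyGetD ((pvIsl (pvG grid) grid.length (grid.getD 0 []).length).map (pvTr grid)) j (0, 0, 0)).2.1 + 1)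
                (max ((p.2 : Nat) : Int) (PySem.List.pyGetD ((pvIsl (pvG grid) grid.length (grid.getD 0 []).length).map (pvTr grid)) j (0, 0, 0)).2.1) 1).all
              (fun k => PySem.List.pyGetD (PySem.List.pyGetD grid ((p.1 : Nat) : Int) []) k 0 == 0)) then
          E ++ [((((p.1 : Nat) : Int), ((p.2 : Nat) : Int)),
                ((PySem.List.pyGetD ((pvIsl (pvG grid) grid.length (grid.getD 0 []).length).map (pvTr grid)) j (0, 0, 0)).1,
                 (PySem.List.pyGetD ((pvIsl (pvG grid) grid.length (grid.getD 0 []).length).map (pvTr grid)) j (0, 0, 0)).2.1))]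
        else if ((p.2 : Nat) : Int) = (PySem.List.pyGetD ((pvIsl (pvG grid) grid.length (grid.getD 0 []).length).map (pvTr grid)) j (0, 0, 0)).2.1 ∧
            ((PySem.List.pyRange (min ((p.1 : Nat) : Int) (PySem.List.pyGetD ((pvIsl (pvG grid) grid.length (grid.getD 0 []).length).map (pvTr grid)) j (0, 0, 0)).1 + 1)
                (max ((p.1 : Nat) : Int) (PySem.List.pyGetD ((pvIsl (pvG grid) grid.length (grid.getD 0 []).length).map (pvTr grid)) j (0, 0, 0)).1) 1).all
              (fun k => PySem.List.pyGetD (PySem.List.pyGetD grid k []) ((p.2 : Nat) : Int) 0 == 0)) then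
          E ++ [((((p.1 : Nat) : Int), ((p.2 : Nat) : Int)),
                ((PySem.List.pyGetD ((pvIsl (pvG grid) grid.length (grid.getD 0 []).length).map (pvTr grid)) j (0, 0, 0)).1,
                 (PySem.List.pyGetD ((pvIsl (pvG grid) grid.length (grid.getD 0 []).length).map (pvTr grid)) j (0, 0, 0)).2.1))]
        else E) E
    = E ++ (rest.filter (fun q => decide (pvConn (pvG grid) p q))).map (pvEdge p) := by
  have h1 : ((s : Int) + 1) = (((s + 1 : Nat) : Nat) : Int) := by push_cast; ring
  rw [h1, PySem.List.foldl_pyRange_pyGetD'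
    ((pvIsl (pvG grid) grid.length (grid.getD 0 []).length).map (pvTr grid)) (0, 0, 0)
    (fun E q =>
      if ((p.1 : Nat) : Int) = q.1 ∧
          ((PySem.List.pyRange (min ((p.2 : Nat) : Int) q.2.1 + 1) (max ((p.2 : Nat) : Int) q.2.1) 1).all
            (fun k => PySem.List.pyGetD (PySem.List.pyGetD grid ((p.1 : Nat) : Int) []) k 0 == 0)) then
        E ++ [((((p.1 : Nat) : Int), ((p.2 : Nat) : Int)), (q.1, q.2.1))]
      else if ((p.2 : Nat) : Int) = q.2.1 ∧
          ((PySem.List.pyRange (min ((p.1 : Nat) : Int) q.1 + 1) (max ((p.1 : Nat) : Int) q.1) 1).all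
            (fun k => PySem.List.pyGetD (PySem.List.pyGetD grid k []) ((p.2 : Nat) : Int) 0 == 0)) then
        E ++ [((((p.1 : Nat) : Int), ((p.2 : Nat) : Int)), (q.1, q.2.1))]
      else E)
    E (by positivity)]
  have h2 : ((((s + 1 : Nat)) : Int)).toNat = s + 1 := by omega
  rw [h2]
  have h3 : ((pvIsl (pvG grid) grid.length (grid.getD 0 []).length).map (pvTr grid)).drop (s + 1)
      = rest.map (pvTr grid) := by
    rw [h, show pre ++ p :: rest = (pre ++ [p]) ++ rest by simp, List.map_append,
      show s + 1 = ((pre ++ [p]).map (pvTr grid)).length by simp [hs]]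
    exact List.drop_left
  rw [h3, List.foldl_map]
  rw [PySem.List.foldl_congr_mem _ _ (fun E q => if pvConn (pvG grid) p q then E ++ [pvEdge p q] else E) E
    (fun acc q _ => pv_innerA grid p q acc)]
  exact PySem.List.foldl_append_ite _ _ _ _

lemma pv_loopA (grid : List (List Int)) :
    ∀ (l pre : List (Nat × Nat)) (E : List ((Int × Int) × (Int × Int))),
      pvIsl (pvG grid) grid.length (grid.getD 0 []).length = pre ++ l →
      (PySem.List.enumerate l (pre.length : Int)).foldl
        (fun E ip =>
          (PySem.List.pyRange (ip.1 + 1)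
              ((((pvIsl (pvG grid) grid.length (grid.getD 0 []).length).map (pvTr grid)).length : Nat) : Int) 1).foldl
            (fun E j =>
              if ((ip.2.1 : Nat) : Int) = (PySem.List.pyGetD ((pvIsl (pvG grid) grid.length (grid.getD 0 []).length).map (pvTr grid)) j (0, 0, 0)).1 ∧
                  ((PySem.List.pyRange (min ((ip.2.2 : Nat) : Int) (PySem.List.pyGetD ((pvIsl (pvG grid) grid.length (grid.getD 0 []).length).map (pvTr grid)) j (0, 0, 0)).2.1 + 1)
                      (max ((ip.2.2 : Nat) : Int) (PySem.List.pyGetD ((pvIsl (pvG grid) grid.length (grid.getD 0 []).length).map (pvTr grid)) j (0, 0, 0)).2.1) 1).all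
                    (fun k => PySem.List.pyGetD (PySem.List.pyGetD grid ((ip.2.1 : Nat) : Int) []) k 0 == 0)) then
                E ++ [((((ip.2.1 : Nat) : Int), ((ip.2.2 : Nat) : Int)),
                      ((PySem.List.pyGetD ((pvIsl (pvG grid) grid.length (grid.getD 0 []).length).map (pvTr grid)) j (0, 0, 0)).1,
                       (PySem.List.pyGetD ((pvIsl (pvG grid) grid.length (grid.getD 0 []).length).map (pvTr grid)) j (0, 0, 0)).2.1))]
              else if ((ip.2.2 : Nat) : Int) = (PySem.List.pyGetD ((pvIsl (pvG grid) grid.length (grid.getD 0 []).length).map (pvTr grid)) j (0, 0, 0)).2.1 ∧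
                  ((PySem.List.pyRange (min ((ip.2.1 : Nat) : Int) (PySem.List.pyGetD ((pvIsl (pvG grid) grid.length (grid.getD 0 []).length).map (pvTr grid)) j (0, 0, 0)).1 + 1)
                      (max ((ip.2.1 : Nat) : Int) (PySem.List.pyGetD ((pvIsl (pvG grid) grid.length (grid.getD 0 []).length).map (pvTr grid)) j (0, 0, 0)).1) 1).all
                    (fun k => PySem.List.pyGetD (PySem.List.pyGetD grid k []) ((ip.2.2 : Nat) : Int) 0 == 0)) then
                E ++ [((((ip.2.1 : Nat) : Int), ((ip.2.2 : Nat) : Int)),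
                      ((PySem.List.pyGetD ((pvIsl (pvG grid) grid.length (grid.getD 0 []).length).map (pvTr grid)) j (0, 0, 0)).1,
                       (PySem.List.pyGetD ((pvIsl (pvG grid) grid.length (grid.getD 0 []).length).map (pvTr grid)) j (0, 0, 0)).2.1))]
              else E) E) E
      = E ++ pvPairsA (pvG grid) l := by
  intro l
  induction l with
  | nil =>
    intro pre E h
    simp [PySem.List.enumerate_nil, pvPairsA]
  | cons p rest ih =>
    intro pre E h
    rw [PySem.List.enumerate_cons, List.foldl_cons]
    simp only
    have hE1 : ∀ (E0 : List ((Int × Int) × (Int × Int))),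
        (PySem.List.pyRange (((pre.length : Nat) : Int) + 1)
            ((((pvIsl (pvG grid) grid.length (grid.getD 0 []).length).map (pvTr grid)).length : Nat) : Int) 1).foldl
          (fun E j =>
            if ((p.1 : Nat) : Int) = (PySem.List.pyGetD ((pvIsl (pvG grid) grid.length (grid.getD 0 []).length).map (pvTr grid)) j (0, 0, 0)).1 ∧
                ((PySem.List.pyRange (min ((p.2 : Nat) : Int) (PySem.List.pyGetD ((pvIsl (pvG grid) grid.length (grid.getD 0 []).length).map (pvTr grid)) j (0, 0, 0)).2.1 + 1)
                    (max ((p.2 : Nat) : Int) (PySem.List.pyGetD ((pvIsl (pvG grid) grid.length (grid.getD 0 []).length).map (pvTr grid)) j (0, 0, 0)).2.1) 1).all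
                  (fun k => PySem.List.pyGetD (PySem.List.pyGetD grid ((p.1 : Nat) : Int) []) k 0 == 0)) then
              E ++ [((((p.1 : Nat) : Int), ((p.2 : Nat) : Int)),
                    ((PySem.List.pyGetD ((pvIsl (pvG grid) grid.length (grid.getD 0 []).length).map (pvTr grid)) j (0, 0, 0)).1,
                     (PySem.List.pyGetD ((pvIsl (pvG grid) grid.length (grid.getD 0 []).length).map (pvTr grid)) j (0, 0, 0)).2.1))]
            else if ((p.2 : Nat) : Int) = (PySem.List.pyGetD ((pvIsl (pvG grid) grid.length (grid.getD 0 []).length).map (pvTr grid)) j (0, 0, 0)).2.1 ∧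
                ((PySem.List.pyRange (min ((p.1 : Nat) : Int) (PySem.List.pyGetD ((pvIsl (pvG grid) grid.length (grid.getD 0 []).length).map (pvTr grid)) j (0, 0, 0)).1 + 1)
                    (max ((p.1 : Nat) : Int) (PySem.List.pyGetD ((pvIsl (pvG grid) grid.length (grid.getD 0 []).length).map (pvTr grid)) j (0, 0, 0)).1) 1).all
                  (fun k => PySem.List.pyGetD (PySem.List.pyGetD grid k []) ((p.2 : Nat) : Int) 0 == 0)) then
              E ++ [((((p.1 : Nat) : Int), ((p.2 : Nat) : Int)),
                    ((PySem.List.pyGetD ((pvIsl (pvG grid) grid.length (grid.getD 0 []).length).map (pvTr grid)) j (0, 0, 0)).1,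
                     (PySem.List.pyGetD ((pvIsl (pvG grid) grid.length (grid.getD 0 []).length).map (pvTr grid)) j (0, 0, 0)).2.1))]
            else E) E0
        = E0 ++ (rest.filter (fun q => decide (pvConn (pvG grid) p q))).map (pvEdge p) :=
      fun E0 => pv_innerLoop grid p pre.length pre rest h rfl E0
    rw [hE1 E]
    rw [show ((pre.length : Int) + 1) = (((pre ++ [p]).length : Nat) : Int) by simp]
    have h' : pvIsl (pvG grid) grid.length (grid.getD 0 []).length = (pre ++ [p]) ++ rest := by
      rw [h]; simp
    rw [ih (pre ++ [p]) _ h', pvPairsA]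
    simp [List.append_assoc]

lemma pv_bridgeA'' (grid : List (List Int)) :
    generate_possible_edges grid
      = pvPairsA (pvG grid) (pvIsl (pvG grid) grid.length (grid.getD 0 []).length) := by
  simp only [generate_possible_edges]
  rw [pv_islandsA, pv_enumerate_map, List.foldl_map]
  exact (pv_loopA grid (pvIsl (pvG grid) grid.length (grid.getD 0 []).length) [] []
    (by simp)).trans (List.nil_append _)

-- ===== VERDICT (by name: the statement is the Claim_ definition above) =====
theorem generate_possible_edges_spec : Claim_equal_generate_possible_edges := by
  intro grid _ _
  unfold Spec_generate_possible_edges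
  rw [pv_bridgeA'', pv_core', ← pv_bridgeB']
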